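-- pv_equiv track=rewrite | github.com/su-jin02/CodingTest | 프로그래머스/2/12981. 영어 끝말잇기/영어 끝말잇기.py | solution
-- ===== SOURCE A (Python) =====
-- def solution(n, words):
--     answer = [0,0]
--     turn = 1
--     speak = [0] * (n+1)
--     last_word = words[0][0]
--     dic = set()
--     for i in words:
--         speak[turn] += 1
--         temp_len = len(dic)
--         dic.add(i)
--         if len(dic) == temp_len or last_word != i[0]:
--             answer[0] = turn
--             answer[1] = speak[turn]
--             return answer
--         last_word = i[-1]
--         if turn == n:
--             turn = 1
--         else:
--             turn += 1
--
--     return answer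
-- ===== SOURCE B (Python) =====
-- def solution(n, words):
--     breaks = [i for i in range(1, len(words)) if words[i][0] != words[i - 1][-1]]
--     dups = [i for i, w in enumerate(words) if words.index(w) != i]
--     fail = min(breaks + dups, default=len(words))
--     if fail == len(words):
--         return [0, 0]
--     return [fail % n + 1, fail // n + 1]
-- ===== Notes on version B (the rewrite author's own statement) =====
-- stated objective: alternative
-- what changed: B replaces A's single early-return pass with its cycling turn counter, per-player speak tally and seen-set-size trick by staged passes: it collects the list of all chain-break indices and the list of all duplicate indices (via words.index), takes their minimum with a default of len(words), and converts that index to [player, round] in closed form as [fail % n + 1, fail // n + 1].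
-- outside the precondition, e.g. on solution(2, ['aa', 'bb', '']): A returns [2, 1], B raises IndexError; on solution(3, ['ab', 'ab', '']): A returns [2, 1], B raises IndexError
import Mathlib
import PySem

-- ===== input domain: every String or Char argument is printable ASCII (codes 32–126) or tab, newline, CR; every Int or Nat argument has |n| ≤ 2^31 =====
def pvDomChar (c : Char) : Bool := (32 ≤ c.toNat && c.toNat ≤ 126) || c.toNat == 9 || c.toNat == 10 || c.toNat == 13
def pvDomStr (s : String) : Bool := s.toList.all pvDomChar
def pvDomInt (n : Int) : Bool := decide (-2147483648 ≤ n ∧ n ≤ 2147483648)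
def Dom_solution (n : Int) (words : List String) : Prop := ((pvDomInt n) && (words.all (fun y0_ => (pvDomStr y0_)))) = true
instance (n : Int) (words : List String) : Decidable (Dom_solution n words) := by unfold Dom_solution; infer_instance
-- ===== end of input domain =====

-- B replaces A's single early-return pass with cycling counters and a seen-set by staged passes:
-- it collects all chain-break indices and all duplicate indices, takes the minimum, and converts
-- it to [player, round] in closed form (alternative decomposition, not claimed faster).

-- ===== PORT A =====
-- A's `speak = [0]*(n+1)` is modelled as an Int-keyed table with default 0: A only ever touches
-- speak[turn] with 1 ≤ turn ≤ n (always in range under Pre_), where the two are exactly equal.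
def solutionGo (n : Int) (speak : PySem.Dict Int Int) (turn : Int) (lastWord : Option Char)
    (dic : PySem.Set String) : List String → List Int
  | [] => [0, 0]
  | i :: rest =>
    let speak' := speak.insert turn (speak.getD turn 0 + 1)
    let tempLen := PySem.Set.len dic
    let dic' := PySem.Set.add dic i
    if PySem.Set.len dic' == tempLen || lastWord != PySem.Str.pyGet? i 0 then
      [turn, speak'.getD turn 0]
    else
      solutionGo n speak' (if turn == n then 1 else turn + 1) (PySem.Str.pyGet? i (-1)) dic' rest

def solution (n : Int) (words : List String) : List Int :=
  match words with
  | [] => [0, 0]   -- unreachable under Pre_: Python raises IndexError on words[0][0]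
  | w :: _ => solutionGo n PySem.Dict.empty 1 (PySem.Str.pyGet? w 0) PySem.Set.empty words

-- ===== PORT B =====
-- `words[i]` / `words[i-1]` are ported with pyGetD: the range keeps 1 <= i < len(words), so the
-- list index is always in range and pyGetD equals Python's indexing.  The character reads
-- `w[0]` / `w[-1]` are ported with Str.pyGet? (none = IndexError): under Pre_ every word is
-- nonempty, so both are `some` and the comparison is Python's; where Python B raises the port
-- is unconstrained.  `words.index(w)` never raises (w is an element), so index? is always some.
def solution_alt (n : Int) (words : List String) : List Int :=
  let breaks := (PySem.List.pyRange 1 (PySem.List.len words) 1).filter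
    (fun i => PySem.Str.pyGet? (PySem.List.pyGetD words i "") 0
           != PySem.Str.pyGet? (PySem.List.pyGetD words (i - 1) "") (-1))
  let dups := ((PySem.List.enumerate words).filter
    (fun p => (PySem.List.index? words p.2).map (fun (k : Nat) => (k : Int)) != some p.1)).map
    (fun p => p.1)
  let fail := PySem.List.minD (breaks ++ dups) (fun x => x) (PySem.List.len words)
  if fail == PySem.List.len words then [0, 0]
  else [PySem.Int.mod fail n + 1, PySem.Int.floordiv fail n + 1]

-- ===== PRECONDITION & SPEC =====
-- Pre_ excludes the inputs on which Python A raises IndexError (n < 1, an empty words list, an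
-- empty-string word reached before the game ends) and, with them, every list containing an
-- empty-string word: on an empty word A's loop stops early while B's staged passes read every
-- word, so B itself raises there (A returns only when the empty word sits after the failure).
def Pre_solution (n : Int) (words : List String) : Prop :=
  1 ≤ n ∧ words ≠ [] ∧ ∀ w ∈ words, w ≠ ""
instance (n : Int) (words : List String) : Decidable (Pre_solution n words) := by
  unfold Pre_solution; infer_instance

def pvWitness_solution : Int × List String := (2, ["ab", "bc"])

def Spec_solution (n : Int) (words : List String) (out : List Int) : Prop := out = solution_alt n words
instance (n : Int) (words : List String) (out : List Int) : Decidable (Spec_solution n words out) := by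
  unfold Spec_solution; infer_instance

-- ===== CLAIM (what is proved, stated in full; the proofs are below) =====
def Claim_equal_solution : Prop := ∀ (n : Int) (words : List String), Dom_solution n words → Pre_solution n words → Spec_solution n words (solution n words)

-- ===== LEMMAS AND PROOFS =====

-- proof-only failure test at index i: the word breaks the chain or repeats an earlier word
def pvChainFail (words : List String) (i : Nat) : Bool :=
  (decide (0 < i) && (PySem.Str.pyGet? (words.getD i "") 0 !=
      (PySem.List.pyGet? words ((i : Int) - 1)).bind (fun p => PySem.Str.pyGet? p (-1)))) ||
  decide (words.getD i "" ∈ words.take i)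

-- proof-only middle form: one early-return pass over the words with an index and a seen-set
-- (A is proved equal to it by a loop invariant; B is proved equal to it via first-failure search)
def pvMidGo (n : Int) (words : List String) (seen : PySem.Set String) (i : Nat) :
    List String → List Int
  | [] => [0, 0]
  | w :: rest =>
    if (decide (0 < i) &&
          (PySem.Str.pyGet? w 0 !=
            (PySem.List.pyGet? words ((i : Int) - 1)).bind (fun p => PySem.Str.pyGet? p (-1)))) ||
        PySem.Set.contains seen w then
      [PySem.Int.mod (i : Int) n + 1, PySem.Int.floordiv (i : Int) n + 1]
    else
      pvMidGo n words (PySem.Set.add seen w) (i + 1) rest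

-- first index j with s ≤ j < s + m and P j
def pvFind (P : Nat → Bool) (s : Nat) : Nat → Option Nat
  | 0 => none
  | m + 1 => if P s then some s else pvFind P (s + 1) m

theorem pvFind_none (P : Nat → Bool) (m : Nat) :
    ∀ s, pvFind P s m = none ↔ ∀ j, s ≤ j → j < s + m → P j = false := by
  induction m with
  | zero => intro s; simp [pvFind]; intro j h1 h2; omega
  | succ m ih =>
    intro s
    rw [pvFind]
    by_cases h : P s = true
    · simp [h]
      exact ⟨s, le_refl s, by omega, h⟩
    · rw [if_neg h, ih (s + 1)]
      constructor
      · intro hall j h1 h2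
        rcases Nat.eq_or_lt_of_le h1 with rfl | hlt
        · exact Bool.eq_false_iff.mpr h
        · exact hall j hlt (by omega)
      · intro hall j h1 h2; exact hall j (by omega) (by omega)

theorem pvFind_some (P : Nat → Bool) (m : Nat) :
    ∀ s j, pvFind P s m = some j →
      s ≤ j ∧ j < s + m ∧ P j = true ∧ ∀ i, s ≤ i → i < j → P i = false := by
  induction m with
  | zero => intro s j h; simp [pvFind] at h
  | succ m ih =>
    intro s j h
    rw [pvFind] at h
    by_cases hP : P s = true
    · rw [if_pos hP] at h
      obtain rfl : s = j := by simpa using h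
      exact ⟨le_refl s, by omega, hP, fun i h1 h2 => by omega⟩
    · rw [if_neg hP] at h
      obtain ⟨h1, h2, h3, h4⟩ := ih (s + 1) j h
      refine ⟨by omega, by omega, h3, fun i hi1 hi2 => ?_⟩
      rcases Nat.eq_or_lt_of_le hi1 with rfl | hlt
      · exact Bool.eq_false_iff.mpr hP
      · exact h4 i hlt hi2

-- B's break test at a cast in-range index is A's chain test
theorem pv_break_eq (words : List String) (j : Nat) (h1 : 0 < j) (h2 : j < words.length) :
    (PySem.Str.pyGet? (PySem.List.pyGetD words ((j : Nat) : Int) "") 0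
        != PySem.Str.pyGet? (PySem.List.pyGetD words (((j : Nat) : Int) - 1) "") (-1))
      = (decide (0 < j) && (PySem.Str.pyGet? (words.getD j "") 0 !=
          (PySem.List.pyGet? words ((j : Int) - 1)).bind (fun p => PySem.Str.pyGet? p (-1)))) := by
  have e2 : ((j : Int) - 1) = (((j - 1 : Nat)) : Int) := by omega
  have e3 : PySem.List.pyGetD words ((j : Int) - 1) "" = words.getD (j - 1) "" := by
    rw [e2, PySem.List.pyGetD_natCast]
  have e4 : PySem.List.pyGet? words ((j : Int) - 1) = some (words.getD (j - 1) "") := by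
    rw [e2, PySem.List.pyGet?_natCast, List.getD_eq_getElem _ _ (by omega)]
    exact List.getElem?_eq_getElem (by omega)
  rw [PySem.List.pyGetD_natCast, e3, e4, decide_eq_true (by omega : 0 < j)]
  simp

-- B's index test at an in-range index is A's duplicate test
theorem pv_dup_eq (words : List String) (k : Nat) (hk : k < words.length) :
    ((PySem.List.index? words (words[k])).map (fun (m : Nat) => (m : Int)) != some ((k : Nat) : Int))
      = decide (words[k] ∈ words.take k) := by
  have hmem : words[k] ∈ words := List.getElem_mem hk
  obtain ⟨m, hm⟩ : ∃ m, PySem.List.index? words (words[k]) = some m := by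
    cases h : PySem.List.index? words (words[k]) with
    | none =>
      have := (PySem.List.index?_isSome_iff words (words[k])).mpr hmem
      rw [h] at this
      simp at this
    | some m => exact ⟨m, rfl⟩
  obtain ⟨hmlt, hmeq, hmin⟩ := PySem.List.getElem_of_index?_eq_some hm
  have hmk : m ≤ k := by
    by_contra hgt
    exact hmin k (by omega) rfl
  rw [hm, Bool.eq_iff_iff]
  simp only [Option.map_some, bne_iff_ne, ne_eq, Option.some.injEq, decide_eq_true_eq,
    List.mem_take_iff_getElem]
  constructor
  · intro hne
    exact ⟨m, by omega, hmeq⟩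
  · rintro ⟨i, hi, hieq⟩
    have : ¬ i < m := fun hlt => hmin i hlt hieq
    intro hc
    have : m = k := by exact_mod_cast hc
    omega

-- min over a list of exactly the failing indices is the first failing index
theorem pv_minD (L : Nat) (P : Nat → Bool) (S : List Int)
    (h1 : ∀ x ∈ S, ∃ j : Nat, x = (j : Int) ∧ j < L ∧ P j = true)
    (h2 : ∀ j : Nat, j < L → P j = true → (j : Int) ∈ S) :
    PySem.List.minD S (fun x => x) ((L : Nat) : Int)
      = (match pvFind P 0 L with | none => ((L : Nat) : Int) | some j => ((j : Nat) : Int)) := by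
  cases hf : pvFind P 0 L with
  | none =>
    have hS : S = [] := by
      rw [List.eq_nil_iff_forall_not_mem]
      intro x hx
      obtain ⟨j, rfl, hjL, hPj⟩ := h1 x hx
      have := (pvFind_none P L 0).mp hf j (by omega) (by omega)
      simp [this] at hPj
    subst hS
    simp [PySem.List.minD, (PySem.List.min?_eq_none_iff _ _).mpr rfl]
  | some j =>
    obtain ⟨-, hjL, hPj, hmin⟩ := pvFind_some P L 0 j hf
    have hjS := h2 j (by omega) hPj
    have hne : S ≠ [] := by intro h; rw [h] at hjS; simp at hjS
    obtain ⟨m, hm⟩ : ∃ m, PySem.List.min? S (fun x => x) = some m := by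
      cases h : PySem.List.min? S (fun x => x) with
      | none => exact absurd ((PySem.List.min?_eq_none_iff _ _).mp h) hne
      | some m => exact ⟨m, rfl⟩
    have hmS := PySem.List.min?_mem hm
    have hle := PySem.List.min?_isMin hm
    obtain ⟨j', rfl, hj'L, hPj'⟩ := h1 m hmS
    have hjj' : j ≤ j' := by
      by_contra hlt
      have := hmin j' (by omega) (by omega)
      simp [this] at hPj'
    have hmj : (j' : Int) ≤ (j : Int) := hle _ hjS
    have : j' = j := by omega
    subst this
    simp [PySem.List.minD, hm]

-- the middle form computes the first failing index
theorem pv_mid_char (n : Int) (words : List String) :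
    ∀ (rest pre : List String), words = pre ++ rest →
      pvMidGo n words (PySem.Set.ofList pre) pre.length rest =
        (match pvFind (fun j => pvChainFail words j) pre.length rest.length with
         | none => [0, 0]
         | some j => [PySem.Int.mod ((j : Nat) : Int) n + 1,
                      PySem.Int.floordiv ((j : Nat) : Int) n + 1]) := by
  intro rest
  induction rest with
  | nil => intro pre hw; simp [pvMidGo, pvFind]
  | cons w rest' ih =>
    intro pre hw
    have hwq : words[pre.length]? = some w := by
      rw [← PySem.List.pyGet?_natCast, hw]
      exact PySem.List.pyGet?_append_length pre rest' w
    have hgetD : words.getD pre.length "" = w := by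
      simp [List.getD_eq_getElem?_getD, hwq]
    have htake : words.take pre.length = pre := by
      rw [hw]; exact List.take_left
    have hcontains : PySem.Set.contains (PySem.Set.ofList pre) w = decide (w ∈ pre) := by
      rw [Bool.eq_iff_iff]
      simp [PySem.Set.mem_ofList]
    have hcond : ((decide (0 < pre.length) &&
          (PySem.Str.pyGet? w 0 !=
            (PySem.List.pyGet? words ((pre.length : Int) - 1)).bind
              (fun p => PySem.Str.pyGet? p (-1)))) ||
        PySem.Set.contains (PySem.Set.ofList pre) w) = pvChainFail words pre.length := by
      rw [pvChainFail, hgetD, htake, hcontains]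
    rw [pvMidGo, hcond, List.length_cons, pvFind]
    by_cases hf : pvChainFail words pre.length = true
    · rw [if_pos hf, if_pos hf]
    · rw [if_neg hf, if_neg hf]
      have hpre' : words = (pre ++ [w]) ++ rest' := by rw [hw]; simp
      have := ih (pre ++ [w]) hpre'
      rw [PySem.Set.ofList_append_singleton] at this
      simpa using this

-- the tail of B: converting the minimum failing index to the answer
theorem pv_tail (n : Int) (words : List String) (S : List Int)
    (h1 : ∀ x ∈ S, ∃ j : Nat, x = (j : Int) ∧ j < words.length ∧ pvChainFail words j = true)
    (h2 : ∀ j : Nat, j < words.length → pvChainFail words j = true → (j : Int) ∈ S) :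
    (if PySem.List.minD S (fun x => x) ((words.length : Nat) : Int)
          == ((words.length : Nat) : Int) then ([0, 0] : List Int)
     else [PySem.Int.mod (PySem.List.minD S (fun x => x) ((words.length : Nat) : Int)) n + 1,
           PySem.Int.floordiv (PySem.List.minD S (fun x => x) ((words.length : Nat) : Int)) n + 1])
      = (match pvFind (fun j => pvChainFail words j) 0 words.length with
         | none => [0, 0]
         | some j => [PySem.Int.mod ((j : Nat) : Int) n + 1,
                      PySem.Int.floordiv ((j : Nat) : Int) n + 1]) := by
  rw [pv_minD words.length (fun j => pvChainFail words j) S h1 h2]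
  cases hf : pvFind (fun j => pvChainFail words j) 0 words.length with
  | none => simp
  | some j =>
    obtain ⟨-, hjL, -, -⟩ := pvFind_some _ _ _ _ hf
    have hne : (((j : Nat) : Int) == ((words.length : Nat) : Int)) = false := by
      simp; omega
    simp [hne]

-- B computes the first failing index (staged passes + min)
theorem pv_alt_char (n : Int) (words : List String) :
    solution_alt n words =
      (match pvFind (fun j => pvChainFail words j) 0 words.length with
       | none => [0, 0]
       | some j => [PySem.Int.mod ((j : Nat) : Int) n + 1,
                    PySem.Int.floordiv ((j : Nat) : Int) n + 1]) := by
  have hlen : PySem.List.len words = ((words.length : Nat) : Int) := PySem.List.len_eq words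
  unfold solution_alt
  rw [hlen]
  set breaks := (PySem.List.pyRange 1 ((words.length : Nat) : Int) 1).filter
    (fun i => PySem.Str.pyGet? (PySem.List.pyGetD words i "") 0
           != PySem.Str.pyGet? (PySem.List.pyGetD words (i - 1) "") (-1)) with hbrk
  set dups := ((PySem.List.enumerate words).filter
    (fun p => (PySem.List.index? words p.2).map (fun (k : Nat) => (k : Int)) != some p.1)).map
    (fun p => p.1) with hdup
  have h1 : ∀ x ∈ breaks ++ dups,
      ∃ j : Nat, x = (j : Int) ∧ j < words.length ∧ pvChainFail words j = true := by
    intro x hx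
    rcases List.mem_append.mp hx with hx | hx
    · rw [hbrk, List.mem_filter] at hx
      obtain ⟨hxr, hxc⟩ := hx
      obtain ⟨hx1, hx2⟩ := PySem.List.mem_pyRange_one.mp hxr
      refine ⟨x.toNat, by omega, by omega, ?_⟩
      have hxe : x = ((x.toNat : Nat) : Int) := by omega
      rw [hxe] at hxc
      rw [pv_break_eq words x.toNat (by omega) (by omega)] at hxc
      simp only [pvChainFail, hxc, Bool.true_or]
    · rw [hdup] at hx
      obtain ⟨p, hp, hpx⟩ := List.mem_map.mp hx
      rw [List.mem_filter] at hp
      obtain ⟨hpe, hpc⟩ := hp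
      obtain ⟨k, hkl, rfl⟩ := (PySem.List.mem_enumerate_iff words 0 p).mp hpe
      refine ⟨k, by simpa using hpx.symm, hkl, ?_⟩
      simp only [zero_add] at hpc
      rw [pv_dup_eq words k hkl] at hpc
      have hgd : words.getD k "" = words[k] := List.getD_eq_getElem words "" hkl
      simp only [pvChainFail, hgd, hpc, Bool.or_true]
  have h2 : ∀ j : Nat, j < words.length → pvChainFail words j = true →
      (j : Int) ∈ breaks ++ dups := by
    intro j hj hF
    rw [pvChainFail, Bool.or_eq_true] at hF
    rcases hF with hF | hF
    · have h0j : 0 < j := by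
        rcases Nat.eq_zero_or_pos j with rfl | h
        · simp at hF
        · exact h
      apply List.mem_append.mpr; left
      rw [hbrk, List.mem_filter]
      refine ⟨PySem.List.mem_pyRange_one.mpr ⟨by omega, by omega⟩, ?_⟩
      rw [pv_break_eq words j h0j hj]
      exact hF
    · apply List.mem_append.mpr; right
      rw [hdup]
      apply List.mem_map.mpr
      refine ⟨((j : Int), words[j]), ?_, rfl⟩
      rw [List.mem_filter]
      constructor
      · exact (PySem.List.mem_enumerate_iff words 0 _).mpr ⟨j, hj, by simp⟩
      · have hgd : words.getD j "" = words[j] := List.getD_eq_getElem words "" hj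
        rw [hgd] at hF
        rw [pv_dup_eq words j hj]
        exact hF
  exact pv_tail n words (breaks ++ dups) h1 h2

theorem pv_mid_eq_alt (n : Int) (words : List String) :
    pvMidGo n words PySem.Set.empty 0 words = solution_alt n words := by
  have h := pv_mid_char n words words [] (by simp)
  simp only [List.length_nil] at h
  rw [show (PySem.Set.empty : PySem.Set String) = PySem.Set.ofList [] from rfl]
  rw [h, ← pv_alt_char n words]

-- successor step of div/mod by a positive modulus
theorem pv_succ_divmod (k nn : Nat) (h : 0 < nn) :
    (k % nn + 1 = nn → (k + 1) / nn = k / nn + 1 ∧ (k + 1) % nn = 0) ∧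
    (k % nn + 1 ≠ nn → (k + 1) / nn = k / nn ∧ (k + 1) % nn = k % nn + 1) := by
  have hdm := Nat.div_add_mod k nn
  have hr : k % nn < nn := Nat.mod_lt _ h
  constructor
  · intro he
    have hmul : nn * (k / nn + 1) = nn * (k / nn) + nn := by ring
    have hk1 : k + 1 = nn * (k / nn + 1) := by omega
    constructor
    · rw [hk1, Nat.mul_div_cancel_left _ h]
    · rw [hk1]; exact Nat.mul_mod_right _ _
  · intro he
    have hlt : k % nn + 1 < nn := by omega
    have hk1 : k + 1 = nn * (k / nn) + (k % nn + 1) := by omega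
    constructor
    · rw [hk1, Nat.mul_add_div h, Nat.div_eq_of_lt hlt]; omega
    · rw [hk1, Nat.mul_add_mod, Nat.mod_eq_of_lt hlt]

-- the duplicate test via set sizes is membership
theorem pv_len_add_eq_iff (s : PySem.Set String) (w : String) :
    (PySem.Set.len (PySem.Set.add s w) == PySem.Set.len s) = PySem.Set.contains s w := by
  by_cases h : w ∈ s
  · simp [PySem.Set.add, PySem.Set.contains, PySem.Set.len, h]
  · simp [PySem.Set.add, PySem.Set.contains, PySem.Set.len, h]

-- bne is symmetric
theorem pv_bne_comm (a b : Option Char) : (a != b) = (b != a) := by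
  by_cases h : a = b
  · subst h; rfl
  · have h2 : (a == b) = false := beq_eq_false_iff_ne.mpr h
    have h3 : (b == a) = false := beq_eq_false_iff_ne.mpr (Ne.symm h)
    simp [bne, h2, h3]

-- main loop invariant: after processing the nonempty prefix `pre` with no failure, A's state is
-- determined by pre, and A's loop agrees with the middle form on the remaining words
theorem pv_go_eq (nn : Nat) (hpos : 0 < nn) (rest : List String) :
    ∀ (pre : List String) (hpre : pre ≠ []) (speak : PySem.Dict Int Int) (dic : PySem.Set String),
    (∀ r : Nat, r < nn → speak.getD ((r : Int) + 1) 0 =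
        ((pre.length / nn : Nat) : Int) + (if r < pre.length % nn then 1 else 0)) →
    dic = PySem.Set.ofList pre →
    solutionGo (nn : Int) speak (((pre.length % nn : Nat) : Int) + 1)
        (PySem.Str.pyGet? (pre.getLast hpre) (-1)) dic rest
      = pvMidGo (nn : Int) (pre ++ rest) dic pre.length rest := by
  induction rest with
  | nil => intro pre hpre speak dic hspeak hdic; simp [solutionGo, pvMidGo]
  | cons w rest' ih =>
    intro pre hpre speak dic hspeak hdic
    have hk : 0 < pre.length := List.length_pos_iff.mpr hpre
    set k := pre.length with hkdef
    -- the previous word, as the middle form reads it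
    have hprev : PySem.List.pyGet? (pre ++ w :: rest') ((k : Int) - 1)
        = some (pre.getLast hpre) := by
      have h1 : ((k : Int) - 1) = ((k - 1 : Nat) : Int) := by omega
      rw [h1, PySem.List.pyGet?_natCast]
      rw [List.getElem?_append_left (by omega)]
      rw [← List.getLast?_eq_getElem?, List.getLast?_eq_some_getLast hpre]
    -- both failure conditions coincide
    have hmod : k % nn < nn := Nat.mod_lt _ hpos
    have hcond : ((PySem.Set.len (PySem.Set.add dic w) == PySem.Set.len dic) ||
          (PySem.Str.pyGet? (pre.getLast hpre) (-1) != PySem.Str.pyGet? w 0))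
        = ((decide (0 < k) && (PySem.Str.pyGet? w 0 !=
            (PySem.List.pyGet? (pre ++ w :: rest') ((k : Int) - 1)).bind
              (fun p => PySem.Str.pyGet? p (-1)))) || PySem.Set.contains dic w) := by
      rw [hprev, pv_len_add_eq_iff]
      have h0k : decide (0 < k) = true := by simp [hk]
      simp only [h0k, Bool.true_and]
      rw [pv_bne_comm, Bool.or_comm]
      rfl
    rw [solutionGo, pvMidGo]
    simp only [hcond]
    by_cases hfail : ((decide (0 < k) && (PySem.Str.pyGet? w 0 !=
            (PySem.List.pyGet? (pre ++ w :: rest') ((k : Int) - 1)).bind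
              (fun p => PySem.Str.pyGet? p (-1)))) || PySem.Set.contains dic w) = true
    · rw [if_pos hfail, if_pos hfail]
      have hget : speak.getD (((k % nn : Nat) : Int) + 1) 0 = ((k / nn : Nat) : Int) := by
        rw [hspeak _ hmod, if_neg (lt_irrefl _)]; ring
      rw [PySem.Dict.getD_insert_self, hget]
      rw [PySem.Int.mod_natCast, PySem.Int.floordiv_natCast]
    · rw [if_neg hfail, if_neg hfail]
      -- no failure: the word is fresh and chains; recurse with pre ++ [w]
      have hdm := pv_succ_divmod k nn hpos
      have happ : pre ++ w :: rest' = (pre ++ [w]) ++ rest' := by simp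
      have hlen : (pre ++ [w]).length = k + 1 := by simp [hkdef]
      have hlast : (pre ++ [w]).getLast (by simp) = w := by simp
      have hdic' : PySem.Set.add dic w = PySem.Set.ofList (pre ++ [w]) := by
        rw [hdic, PySem.Set.ofList, PySem.Set.ofList, List.foldl_append]
        rfl
      have hturn : (if (((k % nn : Nat) : Int) + 1) == (nn : Int) then (1 : Int)
            else ((k % nn : Nat) : Int) + 1 + 1) = (((k + 1) % nn : Nat) : Int) + 1 := by
        by_cases he : k % nn + 1 = nn
        · rw [if_pos (by simp only [beq_iff_eq]; omega), (hdm.1 he).2]; simp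
        · rw [if_neg (by simp only [beq_iff_eq]; omega), (hdm.2 he).2]; push_cast; ring
      have hspeak' : ∀ r : Nat, r < nn →
          (speak.insert (((k % nn : Nat) : Int) + 1)
              (speak.getD (((k % nn : Nat) : Int) + 1) 0 + 1)).getD ((r : Int) + 1) 0 =
            (((pre ++ [w]).length / nn : Nat) : Int) +
              (if r < (pre ++ [w]).length % nn then 1 else 0) := by
        intro r hr
        rw [hlen]
        rw [PySem.Dict.getD_insert]
        by_cases hrk : r = k % nn
        · subst hrk
          rw [if_pos rfl, hspeak _ hmod]
          by_cases he : k % nn + 1 = nn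
          · rw [(hdm.1 he).1, (hdm.1 he).2, if_neg (lt_irrefl _), if_neg (by omega)]
            push_cast; ring
          · rw [(hdm.2 he).1, (hdm.2 he).2, if_neg (lt_irrefl _), if_pos (by omega)]
            push_cast; ring
        · rw [if_neg (by intro hc; apply hrk; omega)]
          rw [hspeak _ hr]
          by_cases he : k % nn + 1 = nn
          · rw [(hdm.1 he).1, (hdm.1 he).2, if_pos (by omega), if_neg (by omega)]
            push_cast; ring
          · rw [(hdm.2 he).1, (hdm.2 he).2]
            by_cases h2 : r < k % nn
            · rw [if_pos h2, if_pos (by omega)]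
            · rw [if_neg h2, if_neg (by omega)]
      have := ih (pre ++ [w]) (by simp) _ _ hspeak' hdic'
      rw [hlast, hlen] at this
      rw [hturn, happ]
      exact this

-- A equals the middle form on Pre_
theorem pv_A_eq_mid (n : Int) (words : List String) (hpre : Pre_solution n words) :
    solution n words = pvMidGo n words PySem.Set.empty 0 words := by
  obtain ⟨hn, hwne, -⟩ := hpre
  cases words with
  | nil => exact absurd rfl hwne
  | cons w rest =>
    have hnn : ((n.toNat : Nat) : Int) = n := Int.toNat_of_nonneg (by omega)
    have hpos : 0 < n.toNat := by omega
    show solutionGo n PySem.Dict.empty 1 (PySem.Str.pyGet? w 0) PySem.Set.empty (w :: rest)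
      = pvMidGo n (w :: rest) PySem.Set.empty 0 (w :: rest)
    rw [← hnn]
    rw [solutionGo, pvMidGo]
    have hc1 : (PySem.Set.len (PySem.Set.add (PySem.Set.empty : PySem.Set String) w) == PySem.Set.len (PySem.Set.empty : PySem.Set String)) = false := by
      simp [PySem.Set.add, PySem.Set.empty, PySem.Set.len, PySem.Set.contains]
    simp only [hc1, bne_self_eq_false, Bool.or_false, Bool.false_or, decide_eq_false (by omega : ¬ (0 < 0)), Bool.false_and, if_neg (Bool.false_ne_true)]
    have hspeak1 : ∀ r : Nat, r < n.toNat →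
        ((PySem.Dict.empty : PySem.Dict Int Int).insert 1
            ((PySem.Dict.empty : PySem.Dict Int Int).getD 1 0 + 1)).getD ((r : Int) + 1) 0 =
          (([w].length / n.toNat : Nat) : Int) + (if r < [w].length % n.toNat then 1 else 0) := by
      intro r hr
      simp only [List.length_singleton]
      by_cases hr0 : r = 0
      · subst hr0
        have : ((0 : Nat) : Int) + 1 = (1 : Int) := by norm_num
        rw [this, PySem.Dict.getD_insert, if_pos rfl]
        by_cases h1 : n.toNat = 1
        · simp [h1, PySem.Dict.getD, PySem.Dict.get?, PySem.Dict.empty]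
        · have h2 : 1 / n.toNat = 0 := Nat.div_eq_of_lt (by omega)
          have h3 : 1 % n.toNat = 1 := Nat.mod_eq_of_lt (by omega)
          simp [h2, h3, PySem.Dict.getD, PySem.Dict.get?, PySem.Dict.empty]
      · rw [PySem.Dict.getD_insert, if_neg (by intro hc; apply hr0; omega)]
        have h2 : 1 / n.toNat = 0 := by
          rcases Nat.lt_or_ge 1 n.toNat with h | h
          · exact Nat.div_eq_of_lt h
          · interval_cases h' : n.toNat
            simp_all
        have h3 : 1 % n.toNat ≤ 1 := by
          have := Nat.mod_le 1 n.toNat; omega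
        have h4 : ¬ r < 1 % n.toNat := by omega
        simp [h2, h4, PySem.Dict.getD, PySem.Dict.get?, PySem.Dict.empty]
    have key := pv_go_eq n.toNat hpos rest [w] (by simp)
      (((PySem.Dict.empty : PySem.Dict Int Int).insert 1
          ((PySem.Dict.empty : PySem.Dict Int Int).getD 1 0 + 1)))
      (PySem.Set.add PySem.Set.empty w) hspeak1 (by
        simp [PySem.Set.ofList, PySem.Set.empty])
    simp only [List.length_singleton, List.getLast_singleton, List.singleton_append] at key
    -- A's turn after the first word: if 1 == n then 1 else 2, which is (1 % n.toNat) + 1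
    have hturn : (if (1 : Int) == ((n.toNat : Nat) : Int) then (1 : Int) else 1 + 1)
        = (((1 % n.toNat : Nat) : Int) + 1) := by
      by_cases h1 : n.toNat = 1
      · rw [if_pos (by simp [h1]), h1]; simp
      · rw [if_neg (by simp; omega)]
        have : 1 % n.toNat = 1 := Nat.mod_eq_of_lt (by omega)
        rw [this]; norm_num
    rw [hturn]
    exact key

-- ===== VERDICT (by name: the statement is the Claim_ definition above) =====
theorem solution_spec : Claim_equal_solution := by
  intro n words _ hpre
  unfold Spec_solution
  rw [pv_A_eq_mid n words hpre, pv_mid_eq_alt]
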